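-- pv_equiv track=rewrite | github.com/Archie519/multi_agent_debate | nodes/memory_node.py | get_agent_memory
-- ===== SOURCE A (Python) =====
-- def get_agent_memory(state, speaker):
--     """
--     Return last 2 unique opponent arguments for context, filtered for duplicates (case-insensitive).
--     """
--     opponent = "Scientist" if speaker == "Philosopher" else "Philosopher"
--     memory = state.get("memory", {}).get(opponent, [])
--
--     seen = set()
--     recent = []
--     for point in reversed(memory):
--         key = point.strip().lower()
--         if key not in seen:
--             seen.add(key)
--             recent.insert(0, point.strip())
--         if len(recent) == 2:
--             break
--
--     return " | ".join(recent) if recent else "No previous argument yet."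
-- ===== SOURCE B (Python) =====
-- def get_agent_memory(state, speaker):
--     """
--     Return last 2 unique opponent arguments for context, filtered for duplicates (case-insensitive).
--     """
--     opponent = "Scientist" if speaker == "Philosopher" else "Philosopher"
--     memory = state.get("memory", {}).get(opponent, [])
--
--     d = {}
--     for point in memory:
--         cleaned = point.strip()
--         key = cleaned.lower()
--         d.pop(key, None)
--         d[key] = cleaned
--
--     recent = list(d.values())[-2:]
--     return " | ".join(recent) if recent else "No previous argument yet."
-- ===== Notes on version B (the rewrite author's own statement) =====
-- stated objective: alternative
-- what changed: Replaces A's reverse scan with a seen-set, insert(0) and an early break by a single forward pass that maintains an insertion-ordered dict keyed by the case-folded stripped point (pop+reinsert tracks last occurrence) and then slices the dict's last two values.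
import Mathlib
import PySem

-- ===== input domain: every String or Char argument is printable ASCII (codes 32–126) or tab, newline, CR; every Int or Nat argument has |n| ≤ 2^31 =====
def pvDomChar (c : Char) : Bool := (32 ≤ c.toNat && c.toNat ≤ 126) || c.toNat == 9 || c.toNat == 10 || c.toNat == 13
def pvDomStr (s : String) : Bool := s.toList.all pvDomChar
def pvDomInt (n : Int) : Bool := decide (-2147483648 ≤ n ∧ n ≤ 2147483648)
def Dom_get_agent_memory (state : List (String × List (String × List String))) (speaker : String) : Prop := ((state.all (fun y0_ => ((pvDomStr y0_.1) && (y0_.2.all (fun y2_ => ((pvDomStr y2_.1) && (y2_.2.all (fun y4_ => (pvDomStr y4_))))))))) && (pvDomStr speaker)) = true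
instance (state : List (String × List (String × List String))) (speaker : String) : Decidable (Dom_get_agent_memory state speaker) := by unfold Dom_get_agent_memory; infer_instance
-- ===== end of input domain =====

-- B replaces A's reverse scan with set + early break + insert(0) by one forward pass that keeps an
-- insertion-ordered dict of last occurrences (pop + reinsert) and slices its last two values (objective: alternative).

-- ===== PORT A =====
-- the 'for point in reversed(memory): … break' loop of A (stops as soon as recent has 2 entries)
def pvLoopA : List String → PySem.Set String → List String → List String
  | [], _, recent => recent
  | point :: rest, seen, recent =>
    let key := PySem.Str.lower (PySem.Str.strip point)
    let sr : PySem.Set String × List String :=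
      if PySem.Set.contains seen key then (seen, recent)
      else (PySem.Set.add seen key, PySem.Str.strip point :: recent)   -- recent.insert(0, …)
    if sr.2.length == 2 then sr.2 else pvLoopA rest sr.1 sr.2

def get_agent_memory (state : List (String × List (String × List String))) (speaker : String) : String :=
  let opponent := if speaker == "Philosopher" then "Scientist" else "Philosopher"
  let memory := PySem.Dict.getD (PySem.Dict.mk (PySem.Dict.getD (PySem.Dict.mk state) "memory" [])) opponent []
  let recent := pvLoopA memory.reverse PySem.Set.empty []
  if recent.isEmpty then "No previous argument yet." else PySem.Str.join " | " recent

-- ===== PORT B =====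
-- d.pop(key, None); d[key] = cleaned   (the pop's result is discarded, so it is Dict.erase)
def pvStepB (d : PySem.Dict String String) (point : String) : PySem.Dict String String :=
  let cleaned := PySem.Str.strip point
  let key := PySem.Str.lower cleaned
  (d.erase key).insert key cleaned

def get_agent_memory_alt (state : List (String × List (String × List String))) (speaker : String) : String :=
  let opponent := if speaker == "Philosopher" then "Scientist" else "Philosopher"
  let memory := PySem.Dict.getD (PySem.Dict.mk (PySem.Dict.getD (PySem.Dict.mk state) "memory" [])) opponent []
  let d := memory.foldl pvStepB PySem.Dict.empty
  let recent := PySem.List.slice (PySem.Dict.values d) (some (-2)) none   -- list(d.values())[-2:]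
  if recent.isEmpty then "No previous argument yet." else PySem.Str.join " | " recent

-- ===== PRECONDITION & SPEC =====
def Spec_get_agent_memory (state : List (String × List (String × List String))) (speaker : String) (out : String) : Prop := out = get_agent_memory_alt state speaker
instance (state : List (String × List (String × List String))) (speaker : String) (out : String) : Decidable (Spec_get_agent_memory state speaker out) := by unfold Spec_get_agent_memory; infer_instance

-- ===== CLAIM (what is proved, stated in full; the proofs are below) =====
def Claim_equal_get_agent_memory : Prop := ∀ (state : List (String × List (String × List String))) (speaker : String), Dom_get_agent_memory state speaker → Spec_get_agent_memory state speaker (get_agent_memory state speaker)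

-- ===== LEMMAS AND PROOFS =====

def pvKey (p : String) : String := PySem.Str.lower (PySem.Str.strip p)

-- the full (uncapped) stream of stripped first-occurrence points of a scan, skipping keys in `seen`
def pvStream : List String → PySem.Set String → List String
  | [], _ => []
  | p :: rest, seen =>
    if PySem.Set.contains seen (pvKey p) then pvStream rest seen
    else PySem.Str.strip p :: pvStream rest (PySem.Set.add seen (pvKey p))

lemma pvLoopA_eq_stream (mem : List String) :
    ∀ (seen : PySem.Set String) (recent : List String), recent.length < 2 →
      pvLoopA mem seen recent = ((pvStream mem seen).take (2 - recent.length)).reverse ++ recent := by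
  induction mem with
  | nil => intro seen recent _; simp [pvLoopA, pvStream]
  | cons p rest ih =>
    intro seen recent hlen
    by_cases h : PySem.Set.contains seen (pvKey p)
    · simp only [pvLoopA, pvStream, pvKey] at *
      rw [if_pos h, if_pos h]
      simp only []
      rw [if_neg (by simp; omega)]
      exact ih seen recent hlen
    · simp only [pvLoopA, pvStream, pvKey] at *
      rw [if_neg h, if_neg h]
      simp only [List.length_cons]
      by_cases h2 : recent.length = 1
      · rw [if_pos (by simp [h2])]
        simp [h2]
      · have h0 : recent.length = 0 := by omega
        rw [if_neg (by simp [h0])]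
        rw [ih _ _ (by simp [h0])]
        simp [h0]
lemma items_stepB (d : PySem.Dict String String) (p : String) :
    (pvStepB d p).items
      = d.items.filter (fun kv => !(kv.1 == pvKey p)) ++ [(pvKey p, PySem.Str.strip p)] := by
  simp [pvStepB, PySem.Dict.erase, PySem.Dict.insert, PySem.Dict.contains, pvKey, List.any_filter]

lemma pvStream_eq_buildB (r : List String) :
    ∀ (seen : PySem.Set String),
      pvStream r seen
        = (((r.reverse.foldl pvStepB PySem.Dict.empty).items.filter
              (fun kv => !(PySem.Set.contains seen kv.1))).map Prod.snd).reverse := by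
  induction r with
  | nil => intro seen; simp [pvStream, PySem.Dict.empty]
  | cons p rest ih =>
    intro seen
    have hfold : (p :: rest).reverse.foldl pvStepB PySem.Dict.empty
        = pvStepB (rest.reverse.foldl pvStepB PySem.Dict.empty) p := by
      simp [List.foldl_append]
    set d0 := rest.reverse.foldl pvStepB PySem.Dict.empty with hd0
    by_cases h : PySem.Set.contains seen (pvKey p)
    · have hmem : pvKey p ∈ seen := by simpa [PySem.Set.contains] using h
      have hstep : pvStream (p :: rest) seen = pvStream rest seen := by
        simp only [pvStream]; rw [if_pos h]
      rw [hstep, ih seen, hfold, items_stepB, List.filter_append, List.filter_filter]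
      have hsingle : List.filter (fun kv => !(PySem.Set.contains seen kv.1))
          [(pvKey p, PySem.Str.strip p)] = [] := by
        simp [PySem.Set.contains, hmem]
      rw [hsingle, List.append_nil]
      have hfilter : d0.items.filter
            (fun kv => !(PySem.Set.contains seen kv.1) && !(kv.1 == pvKey p))
          = d0.items.filter (fun kv => !(PySem.Set.contains seen kv.1)) := by
        apply List.filter_congr
        intro kv _
        by_cases hk : kv.1 = pvKey p
        · simp [PySem.Set.contains, hk, hmem]
        · simp [hk]
      rw [hfilter]
    · have hmem : pvKey p ∉ seen := by simpa [PySem.Set.contains] using h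
      have hstep : pvStream (p :: rest) seen
          = PySem.Str.strip p :: pvStream rest (PySem.Set.add seen (pvKey p)) := by
        simp only [pvStream]; rw [if_neg h]
      rw [hstep, ih (PySem.Set.add seen (pvKey p)), hfold, items_stepB,
        List.filter_append, List.filter_filter]
      have hsingle : List.filter (fun kv => !(PySem.Set.contains seen kv.1))
          [(pvKey p, PySem.Str.strip p)] = [(pvKey p, PySem.Str.strip p)] := by
        simp [PySem.Set.contains, hmem]
      rw [hsingle]
      have hadd : PySem.Set.add seen (pvKey p) = seen ++ [pvKey p] := by
        simp [PySem.Set.add, hmem]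
      have hfilter : d0.items.filter
            (fun kv => !(PySem.Set.contains seen kv.1) && !(kv.1 == pvKey p))
          = d0.items.filter
            (fun kv => !(PySem.Set.contains (PySem.Set.add seen (pvKey p)) kv.1)) := by
        apply List.filter_congr
        intro kv _
        rw [hadd]
        by_cases hk : kv.1 = pvKey p
        · simp [PySem.Set.contains, hk]
        · simp [PySem.Set.contains, hk]
      rw [hfilter]
      simp

-- ===== VERDICT (by name: the statement is the Claim_ definition above) =====
theorem get_agent_memory_spec : Claim_equal_get_agent_memory := by
  intro state speaker _
  unfold Spec_get_agent_memory get_agent_memory get_agent_memory_alt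
  set memory := PySem.Dict.getD (PySem.Dict.mk (PySem.Dict.getD (PySem.Dict.mk state) "memory" []))
      (if speaker == "Philosopher" then "Scientist" else "Philosopher") [] with hm
  have h1 : pvLoopA memory.reverse PySem.Set.empty []
      = ((pvStream memory.reverse PySem.Set.empty).take 2).reverse := by
    rw [pvLoopA_eq_stream memory.reverse PySem.Set.empty [] (by simp)]
    simp
  have h2 : pvStream memory.reverse PySem.Set.empty
      = (PySem.Dict.values (memory.foldl pvStepB PySem.Dict.empty)).reverse := by
    rw [pvStream_eq_buildB memory.reverse PySem.Set.empty]
    simp [PySem.Set.empty, PySem.Set.contains, PySem.Dict.values]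
  have h3 : PySem.List.slice (PySem.Dict.values (memory.foldl pvStepB PySem.Dict.empty))
        (some (-2)) none
      = (PySem.Dict.values (memory.foldl pvStepB PySem.Dict.empty)).drop
        ((PySem.Dict.values (memory.foldl pvStepB PySem.Dict.empty)).length - 2) := by
    rw [PySem.List.slice_from_neg_ofNat _ 2 (by omega)]
  dsimp only
  rw [h1, h2, h3, List.take_reverse, List.reverse_reverse]
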